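-- pv_equiv track=rewrite | github.com/ZRTMRH/polycube-solver | robust_generator.py | _build_nbcount
-- ===== SOURCE A (Python) =====
-- from typing import List, Optional, Set, Tuple, Dict
--
-- Coord = Tuple[int, int, int]
--
-- def _neighbors(cell: Coord, N: int) -> List[Coord]:
--     """6-connected neighbors within an NxNxN grid."""
--     x, y, z = cell
--     out = []
--     if x > 0:     out.append((x - 1, y, z))
--     if x < N - 1: out.append((x + 1, y, z))
--     if y > 0:     out.append((x, y - 1, z))
--     if y < N - 1: out.append((x, y + 1, z))
--     if z > 0:     out.append((x, y, z - 1))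
--     if z < N - 1: out.append((x, y, z + 1))
--     return out
--
-- def _build_nbcount(remaining: Set[Coord], N: int) -> Dict[Coord, int]:
--     """For each cell in remaining, count how many of its 6-neighbors
--     are also in remaining."""
--     nbcount = {}
--     for cell in remaining:
--         cnt = 0
--         for nb in _neighbors(cell, N):
--             if nb in remaining:
--                 cnt += 1
--         nbcount[cell] = cnt
--     return nbcount
-- ===== SOURCE B (Python) =====
-- # B: edge-centric — find each adjacency once via the three +1 neighbors and
-- # credit both endpoints, instead of testing all six neighbors of every cell.
-- def _build_nbcount(remaining, N):
--     nbcount = {cell: 0 for cell in remaining}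
--     for cell in nbcount:
--         x, y, z = cell
--         for nb in ((x + 1, y, z), (x, y + 1, z), (x, y, z + 1)):
--             if nb in nbcount:
--                 nbcount[cell] += 1
--                 nbcount[nb] += 1
--     return nbcount
-- ===== Notes on version B (the rewrite author's own statement) =====
-- stated objective: alternative
-- what changed: B counts adjacencies edge-centrically: it zero-initializes every cell's count, then finds each undirected adjacency once via the three +1 neighbors and credits both endpoints, instead of A's vertex-centric six membership tests per cell; Pre_ excludes inputs whose remaining set contains an adjacent pair sticking out of the NxNxN grid, where A's asymmetric per-direction bound guards credit the adjacency to one endpoint only.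
import Mathlib
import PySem

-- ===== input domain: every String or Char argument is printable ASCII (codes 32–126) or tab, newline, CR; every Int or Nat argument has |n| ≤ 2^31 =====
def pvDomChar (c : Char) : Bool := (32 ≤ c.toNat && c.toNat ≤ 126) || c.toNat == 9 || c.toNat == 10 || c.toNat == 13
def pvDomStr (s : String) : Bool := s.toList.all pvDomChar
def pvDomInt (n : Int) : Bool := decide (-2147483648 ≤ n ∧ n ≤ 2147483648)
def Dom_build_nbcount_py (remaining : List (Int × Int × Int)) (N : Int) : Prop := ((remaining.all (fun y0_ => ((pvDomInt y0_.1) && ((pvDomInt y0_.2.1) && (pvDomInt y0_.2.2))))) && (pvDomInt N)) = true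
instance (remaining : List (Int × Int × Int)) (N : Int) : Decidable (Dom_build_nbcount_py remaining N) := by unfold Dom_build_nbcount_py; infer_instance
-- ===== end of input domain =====

-- B is edge-centric: each undirected adjacency is found once (via the three +1 neighbors)
-- and credited to both endpoints, instead of A's six membership tests per cell.
-- The Python dict result is compared ignoring order; both ports use first-insertion order.

-- ===== PORT A =====
def neighbors_py (cell : Int × Int × Int) (N : Int) : List (Int × Int × Int) :=
  match cell with
  | (x, y, z) =>
    let out : List (Int × Int × Int) := []
    let out := if x > 0 then out ++ [(x - 1, y, z)] else out
    let out := if x < N - 1 then out ++ [(x + 1, y, z)] else out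
    let out := if y > 0 then out ++ [(x, y - 1, z)] else out
    let out := if y < N - 1 then out ++ [(x, y + 1, z)] else out
    let out := if z > 0 then out ++ [(x, y, z - 1)] else out
    let out := if z < N - 1 then out ++ [(x, y, z + 1)] else out
    out

def build_nbcount_py (remaining : List (Int × Int × Int)) (N : Int) : List (Int × Int × Int × Int) :=
  let d : PySem.Dict (Int × Int × Int) Int :=
    remaining.foldl (fun d cell =>
      let cnt := (neighbors_py cell N).foldl
        (fun cnt nb => if remaining.contains nb then cnt + 1 else cnt) 0
      d.insert cell cnt) PySem.Dict.empty
  d.items.map (fun p => (p.1.1, p.1.2.1, p.1.2.2, p.2))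

-- ===== PORT B =====
-- one axis of B's inner loop: if nb is a key, credit both endpoints
-- (nbcount[k] += 1 on a present key = modify k 0 (·+1))
def altAxis (d : PySem.Dict (Int × Int × Int) Int) (cell nb : Int × Int × Int) :
    PySem.Dict (Int × Int × Int) Int :=
  if d.contains nb then (d.modify cell 0 (· + 1)).modify nb 0 (· + 1) else d

def altStep (d : PySem.Dict (Int × Int × Int) Int) (cell : Int × Int × Int) :
    PySem.Dict (Int × Int × Int) Int :=
  match cell with
  | (x, y, z) =>
    let d := altAxis d cell (x + 1, y, z)
    let d := altAxis d cell (x, y + 1, z)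
    altAxis d cell (x, y, z + 1)

def build_nbcount_py_alt (remaining : List (Int × Int × Int)) (N : Int) : List (Int × Int × Int × Int) :=
  let d0 : PySem.Dict (Int × Int × Int) Int :=
    remaining.foldl (fun d cell => d.insert cell 0) PySem.Dict.empty
  let d := d0.keys.foldl altStep d0
  d.items.map (fun p => (p.1.1, p.1.2.1, p.1.2.2, p.2))

-- ===== PRECONDITION & SPEC =====
-- Pre_ excludes inputs where `remaining` contains an adjacent pair of cells that sticks out
-- of the NxNxN grid (the function's stated domain is "6-connected neighbors within an NxNxN
-- grid"): on such pairs A's asymmetric per-direction bound guards count the adjacency for one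
-- endpoint only, an artifact outside the stated domain, while B credits both endpoints.
def Pre_build_nbcount_py (remaining : List (Int × Int × Int)) (N : Int) : Prop :=
  ∀ c ∈ remaining,
    ((c.1 + 1, c.2.1, c.2.2) ∈ remaining → -1 < c.1 ∧ c.1 < N - 1) ∧
    ((c.1, c.2.1 + 1, c.2.2) ∈ remaining → -1 < c.2.1 ∧ c.2.1 < N - 1) ∧
    ((c.1, c.2.1, c.2.2 + 1) ∈ remaining → -1 < c.2.2 ∧ c.2.2 < N - 1)
instance (remaining : List (Int × Int × Int)) (N : Int) : Decidable (Pre_build_nbcount_py remaining N) := by unfold Pre_build_nbcount_py; infer_instance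

def pvWitness_build_nbcount_py : (List (Int × Int × Int)) × Int := ([(0, 0, 0), (1, 0, 0), (1, 1, 0)], 2)

def Spec_build_nbcount_py (remaining : List (Int × Int × Int)) (N : Int) (out : List (Int × Int × Int × Int)) : Prop := out = build_nbcount_py_alt remaining N
instance (remaining : List (Int × Int × Int)) (N : Int) (out : List (Int × Int × Int × Int)) : Decidable (Spec_build_nbcount_py remaining N out) := by unfold Spec_build_nbcount_py; infer_instance

-- ===== CLAIM (what is proved, stated in full; the proofs are below) =====
def Claim_equal_build_nbcount_py : Prop := ∀ (remaining : List (Int × Int × Int)) (N : Int), Dom_build_nbcount_py remaining N → Pre_build_nbcount_py remaining N → Spec_build_nbcount_py remaining N (build_nbcount_py remaining N)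

-- ===== LEMMAS AND PROOFS =====

-- contribution of processing `cell` along one axis, to the count of key `c`
def contribAxis (L : List (Int × Int × Int)) (cell nb c : Int × Int × Int) : Int :=
  if nb ∈ L then (if c = cell then 1 else 0) + (if c = nb then 1 else 0) else 0

-- total contribution of processing `cell` (all three axes) to the count of key `c`
def contrib (L : List (Int × Int × Int)) (cell c : Int × Int × Int) : Int :=
  contribAxis L cell (cell.1 + 1, cell.2.1, cell.2.2) c
  + contribAxis L cell (cell.1, cell.2.1 + 1, cell.2.2) c
  + contribAxis L cell (cell.1, cell.2.1, cell.2.2 + 1) c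

lemma modify_keys_of_mem (d : PySem.Dict (Int × Int × Int) Int) (k : Int × Int × Int)
    (f : Int → Int) (h : k ∈ d.keys) : (d.modify k 0 f).keys = d.keys := by
  rw [PySem.Dict.keys_modify,
    PySem.Dict.keys_insert_of_contains _ _ ((PySem.Dict.contains_iff_mem_keys _ _).2 h)]

lemma altAxis_keys (d : PySem.Dict (Int × Int × Int) Int) (cell nb : Int × Int × Int)
    (hcell : cell ∈ d.keys) : (altAxis d cell nb).keys = d.keys := by
  by_cases hnb : d.contains nb = true
  · have hnbm : nb ∈ d.keys := (PySem.Dict.contains_iff_mem_keys _ _).1 hnb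
    have hc1 : (d.modify cell 0 (· + 1)).keys = d.keys := modify_keys_of_mem _ _ _ hcell
    simp only [altAxis, hnb, if_true]
    rw [modify_keys_of_mem _ _ _ (by rw [hc1]; exact hnbm), hc1]
  · simp [altAxis, hnb]

lemma altAxis_getD (d : PySem.Dict (Int × Int × Int) Int) (cell nb c : Int × Int × Int)
    (hne : cell ≠ nb) :
    (altAxis d cell nb).getD c 0 = d.getD c 0 + contribAxis d.keys cell nb c := by
  unfold altAxis contribAxis
  by_cases hnb : d.contains nb = true
  · have hnb' : nb ∈ d.keys := (PySem.Dict.contains_iff_mem_keys _ _).1 hnb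
    simp [hnb, hnb', PySem.Dict.getD_modify]
    split_ifs <;> simp_all
  · have hnb' : nb ∉ d.keys := fun h => hnb ((PySem.Dict.contains_iff_mem_keys _ _).2 h)
    simp [hnb, hnb']

lemma altStep_keys (d : PySem.Dict (Int × Int × Int) Int)
    (cell : Int × Int × Int) (hcell : cell ∈ d.keys) :
    (altStep d cell).keys = d.keys := by
  obtain ⟨x, y, z⟩ := cell
  simp only [altStep]
  rw [altAxis_keys, altAxis_keys, altAxis_keys] <;> simp_all [altAxis_keys]

lemma altStep_getD (d : PySem.Dict (Int × Int × Int) Int)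
    (cell c : Int × Int × Int) (hcell : cell ∈ d.keys) :
    (altStep d cell).getD c 0 = d.getD c 0 + contrib d.keys cell c := by
  obtain ⟨x, y, z⟩ := cell
  have h1 : ((x : Int), y, z) ≠ (x + 1, y, z) := by simp
  have h2 : ((x : Int), y, z) ≠ (x, y + 1, z) := by simp
  have h3 : ((x : Int), y, z) ≠ (x, y, z + 1) := by simp
  have k1 := altAxis_keys d (x, y, z) (x + 1, y, z) hcell
  have k2 := altAxis_keys (altAxis d (x, y, z) (x + 1, y, z)) (x, y, z) (x, y + 1, z)
      (by rw [k1]; exact hcell)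
  simp only [altStep, contrib]
  rw [altAxis_getD _ _ _ _ h3, altAxis_getD _ _ _ _ h2, altAxis_getD _ _ _ _ h1, k2, k1]
  ring

lemma foldl_altStep (K : List (Int × Int × Int)) (p : List (Int × Int × Int))
    (hp : ∀ a ∈ p, a ∈ K) :
    ∀ d : PySem.Dict (Int × Int × Int) Int, d.keys = K →
      (p.foldl altStep d).keys = K ∧
      ∀ c, (p.foldl altStep d).getD c 0
        = d.getD c 0 + (p.map (fun a => contrib K a c)).sum := by
  induction p with
  | nil => intro d hd; simpa using hd
  | cons a t ih =>
    intro d hd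
    have ha : a ∈ d.keys := by rw [hd]; exact hp a (by simp)
    have hk : (altStep d a).keys = K := by rw [altStep_keys d a ha, hd]
    obtain ⟨ihk, ihg⟩ := ih (fun b hb => hp b (by simp [hb])) (altStep d a) hk
    refine ⟨by simpa using ihk, fun c => ?_⟩
    simp only [List.foldl_cons, List.map_cons, List.sum_cons]
    rw [ihg c, altStep_getD d a c ha, hd]
    ring

lemma getD_foldl_insert_fn (l : List (Int × Int × Int)) (f : (Int × Int × Int) → Int) :
    ∀ (d : PySem.Dict (Int × Int × Int) Int) (k : Int × Int × Int),
      (l.foldl (fun d c => d.insert c (f c)) d).getD k 0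
        = if k ∈ l then f k else d.getD k 0 := by
  induction l with
  | nil => simp
  | cons a t ih =>
    intro d k
    simp only [List.foldl_cons]
    rw [ih]
    by_cases h : k ∈ t
    · simp [h]
    · by_cases h2 : k = a <;> simp [h, h2, PySem.Dict.getD_insert]

lemma sum_ite_mem {α : Type} [DecidableEq α] (K : List α) (hK : K.Nodup) (a₀ : α)
    (v : α → Int) :
    (K.map (fun x => if x = a₀ then v x else 0)).sum = if a₀ ∈ K then v a₀ else 0 := by
  induction K with
  | nil => simp
  | cons h t ih =>
    simp only [List.map_cons, List.sum_cons, List.nodup_cons] at *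
    obtain ⟨hh, ht⟩ := hK
    by_cases he : h = a₀
    · subst he
      simp [hh, ih ht]
    · simp [he, ih ht, Ne.symm he]

lemma axis1_summand (K : List (Int × Int × Int)) (c a : Int × Int × Int) :
    contribAxis K a (a.1 + 1, a.2.1, a.2.2) c
      = (if a = c then (if (c.1 + 1, c.2.1, c.2.2) ∈ K then (1:Int) else 0) else 0)
      + (if a = (c.1 - 1, c.2.1, c.2.2) then (if c ∈ K then (1:Int) else 0) else 0) := by
  obtain ⟨ax, ay, az⟩ := a; obtain ⟨cx, cy, cz⟩ := c
  simp only [contribAxis]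
  by_cases e1 : ax = cx ∧ ay = cy ∧ az = cz
  · obtain ⟨rfl, rfl, rfl⟩ := e1
    simp only [Prod.mk.injEq, and_true]
    split_ifs <;> omega
  · by_cases e2 : ax = cx - 1 ∧ ay = cy ∧ az = cz
    · obtain ⟨h1, rfl, rfl⟩ := e2
      subst h1
      have hh : (cx : Int) - 1 + 1 = cx := by ring
      rw [hh]
      simp only [Prod.mk.injEq, and_true]
      split_ifs <;> omega
    · simp only [Prod.mk.injEq]
      split_ifs <;> omega

lemma axis2_summand (K : List (Int × Int × Int)) (c a : Int × Int × Int) :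
    contribAxis K a (a.1, a.2.1 + 1, a.2.2) c
      = (if a = c then (if (c.1, c.2.1 + 1, c.2.2) ∈ K then (1:Int) else 0) else 0)
      + (if a = (c.1, c.2.1 - 1, c.2.2) then (if c ∈ K then (1:Int) else 0) else 0) := by
  obtain ⟨ax, ay, az⟩ := a; obtain ⟨cx, cy, cz⟩ := c
  simp only [contribAxis]
  by_cases e1 : ax = cx ∧ ay = cy ∧ az = cz
  · obtain ⟨rfl, rfl, rfl⟩ := e1
    simp only [Prod.mk.injEq, true_and]
    split_ifs <;> omega
  · by_cases e2 : ax = cx ∧ ay = cy - 1 ∧ az = cz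
    · obtain ⟨rfl, h1, rfl⟩ := e2
      subst h1
      have hh : (cy : Int) - 1 + 1 = cy := by ring
      rw [hh]
      simp only [Prod.mk.injEq, true_and]
      split_ifs <;> omega
    · simp only [Prod.mk.injEq]
      split_ifs <;> omega

lemma axis3_summand (K : List (Int × Int × Int)) (c a : Int × Int × Int) :
    contribAxis K a (a.1, a.2.1, a.2.2 + 1) c
      = (if a = c then (if (c.1, c.2.1, c.2.2 + 1) ∈ K then (1:Int) else 0) else 0)
      + (if a = (c.1, c.2.1, c.2.2 - 1) then (if c ∈ K then (1:Int) else 0) else 0) := by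
  obtain ⟨ax, ay, az⟩ := a; obtain ⟨cx, cy, cz⟩ := c
  simp only [contribAxis]
  by_cases e1 : ax = cx ∧ ay = cy ∧ az = cz
  · obtain ⟨rfl, rfl, rfl⟩ := e1
    simp only [Prod.mk.injEq, true_and]
    split_ifs <;> omega
  · by_cases e2 : ax = cx ∧ ay = cy ∧ az = cz - 1
    · obtain ⟨rfl, rfl, h1⟩ := e2
      subst h1
      have hh : (cz : Int) - 1 + 1 = cz := by ring
      rw [hh]
      simp only [Prod.mk.injEq, true_and]
      split_ifs <;> omega
    · simp only [Prod.mk.injEq]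
      split_ifs <;> omega

lemma countP_ite {α : Type} (p : α → Bool) (b : Prop) [Decidable b] (l1 l2 : List α) :
    List.countP p (if b then l1 else l2) = if b then List.countP p l1 else List.countP p l2 := by
  split_ifs <;> rfl

lemma ite_add_right (b : Prop) [Decidable b] (X c : Nat) :
    (if b then X + c else X) = X + (if b then c else 0) := by
  split_ifs <;> simp

lemma ite_swap (P Q : Prop) [Decidable P] [Decidable Q] :
    (if P then (if Q then (1:Int) else 0) else 0) = (if Q then (if P then 1 else 0) else 0) := by
  split_ifs <;> rfl

lemma cntA_eq (remaining : List (Int × Int × Int)) (N x y z : Int) :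
    (neighbors_py (x, y, z) N).foldl
        (fun cnt nb => if remaining.contains nb then cnt + 1 else cnt) 0
      = (if (x - 1, y, z) ∈ remaining then (if x > 0 then (1:Int) else 0) else 0)
      + (if (x + 1, y, z) ∈ remaining then (if x < N - 1 then (1:Int) else 0) else 0)
      + (if (x, y - 1, z) ∈ remaining then (if y > 0 then (1:Int) else 0) else 0)
      + (if (x, y + 1, z) ∈ remaining then (if y < N - 1 then (1:Int) else 0) else 0)
      + (if (x, y, z - 1) ∈ remaining then (if z > 0 then (1:Int) else 0) else 0)
      + (if (x, y, z + 1) ∈ remaining then (if z < N - 1 then (1:Int) else 0) else 0) := by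
  simp only [neighbors_py]
  rw [PySem.List.foldl_if_add_one]
  simp only [countP_ite, List.countP_append, List.countP_cons, List.countP_nil,
    List.contains_iff_mem, ite_add_right]
  push_cast
  simp only [ite_swap]
  ring

-- under Pre_, a neighbor's membership implies A's bound guard, so the guard drops
lemma ite_guard_drop (P Q : Prop) [Decidable P] [Decidable Q] (h : P → Q) :
    (if P then (if Q then (1:Int) else 0) else 0) = if P then (1:Int) else 0 := by
  split_ifs with h1 h2 <;> simp_all

lemma crux (remaining : List (Int × Int × Int)) (N : Int)
    (hpre : Pre_build_nbcount_py remaining N) (c : Int × Int × Int)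
    (hc : c ∈ remaining) :
    ((PySem.Set.ofList remaining).map
        (fun a => contrib (PySem.Set.ofList remaining) a c)).sum
      = (neighbors_py c N).foldl
          (fun cnt nb => if remaining.contains nb then cnt + 1 else cnt) 0 := by
  obtain ⟨x, y, z⟩ := c
  have hnd := PySem.Set.nodup_ofList remaining
  simp only [contrib, axis1_summand, axis2_summand, axis3_summand]
  simp only [PySem.List.sum_map_add_int]
  rw [sum_ite_mem _ hnd, sum_ite_mem _ hnd, sum_ite_mem _ hnd, sum_ite_mem _ hnd,
    sum_ite_mem _ hnd, sum_ite_mem _ hnd, cntA_eq]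
  simp only [PySem.Set.mem_ofList]
  simp only [hc, if_true]
  rw [ite_guard_drop ((x - 1, y, z) ∈ remaining) (x > 0)
        (fun h => by have h2 := (hpre _ h).1; simp at h2; have := h2 hc; omega),
      ite_guard_drop ((x + 1, y, z) ∈ remaining) (x < N - 1)
        (fun h => by have h2 := (hpre _ hc).1; simp at h2; have := h2 h; omega),
      ite_guard_drop ((x, y - 1, z) ∈ remaining) (y > 0)
        (fun h => by have h2 := (hpre _ h).2.1; simp at h2; have := h2 hc; omega),
      ite_guard_drop ((x, y + 1, z) ∈ remaining) (y < N - 1)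
        (fun h => by have h2 := (hpre _ hc).2.1; simp at h2; have := h2 h; omega),
      ite_guard_drop ((x, y, z - 1) ∈ remaining) (z > 0)
        (fun h => by have h2 := (hpre _ h).2.2; simp at h2; have := h2 hc; omega),
      ite_guard_drop ((x, y, z + 1) ∈ remaining) (z < N - 1)
        (fun h => by have h2 := (hpre _ hc).2.2; simp at h2; have := h2 h; omega)]
  ring

-- ===== VERDICT (by name: the statement is the Claim_ definition above) =====
theorem build_nbcount_py_spec : Claim_equal_build_nbcount_py := by
  intro remaining N _ hpre
  show build_nbcount_py remaining N = build_nbcount_py_alt remaining N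
  simp only [build_nbcount_py, build_nbcount_py_alt]
  congr 1
  have hkA : (remaining.foldl (fun d cell => d.insert cell ((neighbors_py cell N).foldl
      (fun cnt nb => if remaining.contains nb then cnt + 1 else cnt) 0))
      (PySem.Dict.empty : PySem.Dict (Int × Int × Int) Int)).keys
      = PySem.Set.ofList remaining := by
    rw [PySem.Dict.keys_foldl_insert, PySem.Dict.keys_empty]; rfl
  have hndA := PySem.Dict.nodup_keys_foldl_insert remaining
      (fun d cell => (neighbors_py cell N).foldl
        (fun cnt nb => if remaining.contains nb then cnt + 1 else cnt) 0)
      (PySem.Dict.empty : PySem.Dict (Int × Int × Int) Int) PySem.Dict.nodup_keys_empty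
  have hk0 : (remaining.foldl (fun d cell => d.insert cell 0)
      (PySem.Dict.empty : PySem.Dict (Int × Int × Int) Int)).keys
      = PySem.Set.ofList remaining := by
    rw [PySem.Dict.keys_foldl_insert (f := fun _ _ => (0:Int)), PySem.Dict.keys_empty]; rfl
  have hv0 : ∀ k, (remaining.foldl (fun d cell => d.insert cell 0)
      (PySem.Dict.empty : PySem.Dict (Int × Int × Int) Int)).getD k 0 = 0 := by
    intro k
    rw [getD_foldl_insert_fn remaining (fun _ => (0:Int))]
    simp [PySem.Dict.getD_empty]
  obtain ⟨hkB, hvB⟩ := foldl_altStep (PySem.Set.ofList remaining)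
      (PySem.Set.ofList remaining) (fun a ha => ha) _ hk0
  rw [hk0]
  rw [PySem.Dict.items_eq_map_keys _ hndA 0, PySem.Dict.items_eq_map_keys _ (by rw [hkB]; exact PySem.Set.nodup_ofList remaining) 0]
  rw [hkA, hkB]
  apply List.map_congr_left
  intro k hk
  have hkm : k ∈ remaining := (PySem.Set.mem_ofList remaining k).1 hk
  have hvA : ∀ k, (remaining.foldl (fun d cell => d.insert cell ((neighbors_py cell N).foldl
      (fun cnt nb => if remaining.contains nb then cnt + 1 else cnt) 0))
      (PySem.Dict.empty : PySem.Dict (Int × Int × Int) Int)).getD k 0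
      = if k ∈ remaining then (neighbors_py k N).foldl
          (fun cnt nb => if remaining.contains nb then cnt + 1 else cnt) 0 else 0 := by
    intro k'
    rw [getD_foldl_insert_fn remaining (fun cell => (neighbors_py cell N).foldl
      (fun cnt nb => if remaining.contains nb then cnt + 1 else cnt) 0)]
    simp [PySem.Dict.getD_empty]
  refine Prod.ext rfl ?_
  rw [hvA k, hvB k, hv0 k, crux remaining N hpre k hkm]
  simp [hkm]
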